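-- pv_equiv track=rewrite | github.com/AnanthaLakshmi3/python | CAKEHALF.py | charlie_eats_slices
-- ===== SOURCE A (Python) =====
-- import math
--
-- def charlie_eats_slices(T, cases):
--     results = []
--     for A, B in cases:
--         total_eaten = 0
--         while A != B:
--             if A > B:
--                 eat = math.ceil(A / 2)
--                 A -= eat
--             else:
--                 eat = math.ceil(B / 2)
--                 B -= eat
--             total_eaten += eat
--         results.append(total_eaten)
--     return results
-- ===== SOURCE B (Python) =====
-- def charlie_eats_slices(T, cases):
--     # Lowest-common-ancestor view: halving x is moving to its parent in the
--     # infinite binary tree, so the meeting value is the deepest common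
--     # ancestor of A and B; total eaten = A + B - 2 * meeting value.
--     results = []
--     for A, B in cases:
--         ancestors = set()
--         x = A
--         while x > 0:
--             ancestors.add(x)
--             x //= 2
--         ancestors.add(x)
--         y = B
--         while y not in ancestors and y > 0:
--             y //= 2
--         results.append(A + B - 2 * y)
--     return results
-- ===== Notes on version B (the rewrite author's own statement) =====
-- stated objective: alternative
-- what changed: B replaces A's simulation of alternately halving the larger and summing the eaten amounts by a lowest-common-ancestor computation in the implicit binary tree (parent = x//2): it builds the set of A's halving ancestors once, walks B down to the first ancestor in that set, and returns A+B-2*meet.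
-- outside the precondition, e.g. on charlie_eats_slices(1, [(0, -2)]): A does not finish within the time limit, B returns [2]
import Mathlib
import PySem

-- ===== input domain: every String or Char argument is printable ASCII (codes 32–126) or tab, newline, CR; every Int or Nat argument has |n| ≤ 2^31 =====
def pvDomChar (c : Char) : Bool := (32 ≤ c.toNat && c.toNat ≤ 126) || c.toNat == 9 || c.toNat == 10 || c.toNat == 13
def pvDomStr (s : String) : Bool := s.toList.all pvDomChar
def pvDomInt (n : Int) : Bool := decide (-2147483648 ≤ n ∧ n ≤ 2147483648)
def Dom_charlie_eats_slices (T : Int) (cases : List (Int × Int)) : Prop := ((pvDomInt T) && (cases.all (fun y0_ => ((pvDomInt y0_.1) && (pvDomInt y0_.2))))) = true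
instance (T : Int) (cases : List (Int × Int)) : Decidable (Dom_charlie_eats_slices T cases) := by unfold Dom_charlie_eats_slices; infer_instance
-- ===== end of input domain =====

-- B replaces A's eaten-sum simulation by a lowest-common-ancestor search in the
-- implicit binary tree (parent = x//2): ancestor set of A, first hit of B's chain,
-- answer A+B-2*meet (objective: alternative algorithm).

-- ===== PORT A =====
-- A's while loop, fueled (the fuel is only a totality guard; inside Pre_ it never runs out).
-- math.ceil(x / 2) on these ints is exactly ⌈x/2⌉ = -((-x) // 2).
def pvLoopA (a b total : Int) : Nat → Int
  | 0 => total
  | f + 1 =>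
    if a ≠ b then
      if a > b then
        let eat := -(PySem.Int.floordiv (-a) 2)
        pvLoopA (a - eat) b (total + eat) f
      else
        let eat := -(PySem.Int.floordiv (-b) 2)
        pvLoopA a (b - eat) (total + eat) f
    else total

def charlie_eats_slices (T : Int) (cases : List (Int × Int)) : List Int :=
  cases.foldl (fun results p => results ++ [pvLoopA p.1 p.2 0 ((p.1 + p.2).toNat + 1)]) []

-- ===== PORT B =====
-- 'ancestors = set(); x = A; while x > 0: ancestors.add(x); x //= 2', fueled.
def pvChainLoop (x : Int) (anc : PySem.Set Int) : Nat → PySem.Set Int × Int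
  | 0 => (anc, x)
  | f + 1 =>
    if x > 0 then pvChainLoop (PySem.Int.floordiv x 2) (anc.add x) f else (anc, x)

-- the ancestor set of A: the loop above, then 'ancestors.add(x)'.
def pvAnc (A : Int) : PySem.Set Int :=
  let r := pvChainLoop A PySem.Set.empty (A.toNat + 1)
  r.1.add r.2

-- 'y = B; while y not in ancestors and y > 0: y //= 2', fueled.
def pvDescend (y : Int) (anc : PySem.Set Int) : Nat → Int
  | 0 => y
  | f + 1 =>
    if ¬ (PySem.Set.contains anc y = true) ∧ y > 0 then
      pvDescend (PySem.Int.floordiv y 2) anc f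
    else y

def charlie_eats_slices_alt (T : Int) (cases : List (Int × Int)) : List Int :=
  cases.foldl
    (fun results p =>
      results ++ [p.1 + p.2 - 2 * pvDescend p.2 (pvAnc p.1) (p.2.toNat + 1)]) []

-- ===== PRECONDITION & SPEC =====
-- Pre_ excludes exactly the pairs on which A's while loop never terminates (a negative
-- member with the pair unequal makes the larger value a fixed point of the halving).
def Pre_charlie_eats_slices (T : Int) (cases : List (Int × Int)) : Prop :=
  ∀ p ∈ cases, p.1 = p.2 ∨ (0 ≤ p.1 ∧ 0 ≤ p.2)
instance (T : Int) (cases : List (Int × Int)) : Decidable (Pre_charlie_eats_slices T cases) := by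
  unfold Pre_charlie_eats_slices; infer_instance

def pvWitness_charlie_eats_slices : Int × (List (Int × Int)) := (2, [(10, 3), (-4, -4), (0, 7)])

def Spec_charlie_eats_slices (T : Int) (cases : List (Int × Int)) (out : List Int) : Prop := out = charlie_eats_slices_alt T cases
instance (T : Int) (cases : List (Int × Int)) (out : List Int) : Decidable (Spec_charlie_eats_slices T cases out) := by unfold Spec_charlie_eats_slices; infer_instance

-- ===== CLAIM (what is proved, stated in full; the proofs are below) =====
def Claim_equal_charlie_eats_slices : Prop := ∀ (T : Int) (cases : List (Int × Int)), Dom_charlie_eats_slices T cases → Pre_charlie_eats_slices T cases → Spec_charlie_eats_slices T cases (charlie_eats_slices T cases)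

-- ===== LEMMAS AND PROOFS =====

-- The halving chain of a: [a, a//2, …] down to the first non-positive element.
def pvChainList (a : Int) : List Int :=
  if 0 < a then a :: pvChainList (a / 2) else [a]
termination_by a.toNat
decreasing_by omega

theorem pvChainList_pos (a : Int) (h : 0 < a) :
    pvChainList a = a :: pvChainList (a / 2) := by
  rw [pvChainList, if_pos h]

theorem pvChainList_nonpos (a : Int) (h : ¬ 0 < a) : pvChainList a = [a] := by
  rw [pvChainList, if_neg h]

theorem pvMem_chainList_self (a : Int) : a ∈ pvChainList a := by
  rw [pvChainList]; split_ifs <;> simp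

theorem pvChainList_le (a : Int) : ∀ v ∈ pvChainList a, v ≤ a := by
  rw [pvChainList]
  split_ifs with h
  · intro v hv
    rcases List.mem_cons.mp hv with h1 | h2
    · omega
    · have := pvChainList_le (a / 2) v h2; omega
  · intro v hv; simp at hv; omega
termination_by a.toNat
decreasing_by omega

-- Membership in the built ancestor set = membership in the halving chain.
theorem pvChainLoop_mem : ∀ (f : Nat) (x : Int) (s : PySem.Set Int) (v : Int),
    x.toNat < f →
    (v ∈ ((pvChainLoop x s f).1.add (pvChainLoop x s f).2) ↔ v ∈ s ∨ v ∈ pvChainList x) := by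
  intro f
  induction f with
  | zero => intro x s v h; omega
  | succ f ih =>
    intro x s v hf
    by_cases hx : 0 < x
    · have hd : PySem.Int.floordiv x 2 = x / 2 := PySem.Int.floordiv_eq_ediv_of_pos (by omega)
      simp only [pvChainLoop, if_pos hx]
      rw [ih _ _ v (by rw [hd]; omega)]
      rw [hd, PySem.Set.mem_add]
      conv_rhs => rw [pvChainList_pos x hx]
      simp only [List.mem_cons]
      tauto
    · simp only [pvChainLoop, if_neg hx]
      rw [PySem.Set.mem_add]
      rw [pvChainList_nonpos x hx]
      simp only [List.mem_singleton]
  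
theorem pvMem_anc (A v : Int) : v ∈ pvAnc A ↔ v ∈ pvChainList A := by
  unfold pvAnc
  rw [pvChainLoop_mem (A.toNat + 1) A PySem.Set.empty v (by omega)]
  simp [PySem.Set.empty]

theorem pvContains_anc (A v : Int) :
    PySem.Set.contains (pvAnc A) v = true ↔ v ∈ pvChainList A := by
  rw [PySem.Set.contains_iff, pvMem_anc]

-- Mathematical form of the descent loop.
def pvFirstHit (y : Int) (anc : PySem.Set Int) : Int :=
  if ¬ (PySem.Set.contains anc y = true) ∧ 0 < y then
    pvFirstHit (y / 2) anc
  else y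
termination_by y.toNat
decreasing_by omega

theorem pvDescend_eq_firstHit : ∀ (f : Nat) (y : Int) (anc : PySem.Set Int),
    y.toNat < f → pvDescend y anc f = pvFirstHit y anc := by
  intro f
  induction f with
  | zero => intro y anc h; omega
  | succ f ih =>
    intro y anc hf
    by_cases hc : ¬ (PySem.Set.contains anc y = true) ∧ y > 0
    · have hd : PySem.Int.floordiv y 2 = y / 2 := PySem.Int.floordiv_eq_ediv_of_pos (by omega)
      simp only [pvDescend, if_pos hc]
      rw [ih _ _ (by rw [hd]; omega), hd]
      conv_rhs => rw [pvFirstHit]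
      rw [if_pos (⟨hc.1, hc.2⟩ : ¬ (PySem.Set.contains anc y = true) ∧ 0 < y)]
    · simp only [pvDescend, if_neg hc]
      rw [pvFirstHit, if_neg (by exact hc)]

-- On an equal pair the meet is the pair itself.
theorem pvFirstHit_self (a : Int) : pvFirstHit a (pvAnc a) = a := by
  rw [pvFirstHit]
  have h : PySem.Set.contains (pvAnc a) a = true := (pvContains_anc a a).mpr (pvMem_chainList_self a)
  rw [if_neg (fun hcon => hcon.1 h)]

-- Halving the larger left value does not change the meet (y strictly below a).
theorem pvFirstHit_left (a : Int) (ha : 0 < a) (y : Int) (hy : 0 ≤ y) (hya : y < a) :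
    pvFirstHit y (pvAnc a) = pvFirstHit y (pvAnc (a / 2)) := by
  have hcc : PySem.Set.contains (pvAnc a) y = PySem.Set.contains (pvAnc (a / 2)) y := by
    by_cases h1 : y ∈ pvChainList (a / 2)
    · have h2 : y ∈ pvChainList a := by
        rw [pvChainList, if_pos ha]; exact List.mem_cons_of_mem a h1
      rw [(pvContains_anc a y).mpr h2, (pvContains_anc (a/2) y).mpr h1]
    · have h2 : ¬ y ∈ pvChainList a := by
        rw [pvChainList, if_pos ha]
        intro hm
        rcases List.mem_cons.mp hm with he | hm2
        · omega
        · exact h1 hm2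
      have e1 : PySem.Set.contains (pvAnc a) y = false := by
        cases hb : PySem.Set.contains (pvAnc a) y
        · rfl
        · exact absurd ((pvContains_anc a y).mp hb) h2
      have e2 : PySem.Set.contains (pvAnc (a/2)) y = false := by
        cases hb : PySem.Set.contains (pvAnc (a/2)) y
        · rfl
        · exact absurd ((pvContains_anc (a/2) y).mp hb) h1
      rw [e1, e2]
  rw [pvFirstHit]
  conv_rhs => rw [pvFirstHit]
  rw [hcc]
  split_ifs with h
  · exact pvFirstHit_left a ha (y / 2) (by omega) (by omega)
  · rfl
termination_by y.toNat
decreasing_by omega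

-- Halving a right value strictly above a is one step of the descent.
theorem pvFirstHit_right (a b : Int) (ha : 0 ≤ a) (hb : a < b) :
    pvFirstHit b (pvAnc a) = pvFirstHit (b / 2) (pvAnc a) := by
  have hnot : ¬ b ∈ pvChainList a := fun hm => by
    have := pvChainList_le a b hm; omega
  rw [pvFirstHit, if_pos (⟨fun hc => hnot ((pvContains_anc a b).mp hc), by omega⟩ : ¬ (PySem.Set.contains (pvAnc a) b = true) ∧ 0 < b)]

-- Loop correspondence: A's fueled simulation equals total + a + b - 2 * meet.
theorem pvLoop_eq : ∀ (f : Nat) (a b total : Int),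
    (a = b ∨ (0 ≤ a ∧ 0 ≤ b)) → (a + b).toNat < f →
    pvLoopA a b total f = total + a + b - 2 * pvFirstHit b (pvAnc a) := by
  intro f
  induction f with
  | zero => intro a b total _ h; omega
  | succ f ih =>
    intro a b total hpre hf
    by_cases hab : a = b
    · subst hab
      simp only [pvLoopA, ne_eq, not_true_eq_false, ite_false]
      rw [pvFirstHit_self]; omega
    · have hnn : 0 ≤ a ∧ 0 ≤ b := hpre.resolve_left hab
      by_cases hgt : a > b
      · have hd : PySem.Int.floordiv (-a) 2 = (-a) / 2 :=
          PySem.Int.floordiv_eq_ediv_of_pos (by omega)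
        have hstep : a - -(PySem.Int.floordiv (-a) 2) = a / 2 := by rw [hd]; omega
        simp only [pvLoopA, if_pos (by exact hab : a ≠ b), if_pos hgt]
        rw [hstep]
        have hrec := ih (a / 2) b (total + -(PySem.Int.floordiv (-a) 2))
          (Or.inr ⟨by omega, hnn.2⟩) (by omega)
        rw [hrec, ← pvFirstHit_left a (by omega) b hnn.2 (by omega), hd]
        omega
      · have hlt : a < b := by omega
        have hd : PySem.Int.floordiv (-b) 2 = (-b) / 2 :=
          PySem.Int.floordiv_eq_ediv_of_pos (by omega)
        have hstep : b - -(PySem.Int.floordiv (-b) 2) = b / 2 := by rw [hd]; omega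
        simp only [pvLoopA, if_pos (by exact hab : a ≠ b), if_neg hgt]
        rw [hstep]
        have hrec := ih a (b / 2) (total + -(PySem.Int.floordiv (-b) 2))
          (Or.inr ⟨hnn.1, by omega⟩) (by omega)
        rw [hrec, ← pvFirstHit_right a b hnn.1 hlt, hd]
        omega

-- Per-pair agreement with the ports' actual fuels.
theorem pvElem_eq (a b : Int) (h : a = b ∨ (0 ≤ a ∧ 0 ≤ b)) :
    pvLoopA a b 0 ((a + b).toNat + 1) =
      a + b - 2 * pvDescend b (pvAnc a) (b.toNat + 1) := by
  rw [pvDescend_eq_firstHit (b.toNat + 1) b (pvAnc a) (by omega)]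
  have := pvLoop_eq ((a + b).toNat + 1) a b 0 h (by omega)
  omega

theorem pvFold_eq (cases : List (Int × Int)) (init : List Int)
    (h : ∀ p ∈ cases, p.1 = p.2 ∨ (0 ≤ p.1 ∧ 0 ≤ p.2)) :
    cases.foldl (fun results p => results ++ [pvLoopA p.1 p.2 0 ((p.1 + p.2).toNat + 1)]) init =
      cases.foldl
        (fun results p =>
          results ++ [p.1 + p.2 - 2 * pvDescend p.2 (pvAnc p.1) (p.2.toNat + 1)]) init := by
  induction cases generalizing init with
  | nil => rfl
  | cons p rest ih =>
    simp only [List.foldl_cons]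
    rw [pvElem_eq p.1 p.2 (h p (by simp))]
    exact ih _ (fun q hq => h q (by simp [hq]))

-- ===== VERDICT (by name: the statement is the Claim_ definition above) =====
theorem charlie_eats_slices_spec : Claim_equal_charlie_eats_slices := by
  intro T cases _ hpre
  unfold Spec_charlie_eats_slices charlie_eats_slices charlie_eats_slices_alt
  exact pvFold_eq cases [] hpre
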